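-- pv_equiv track=rewrite | github.com/HAZberi/leetcode-problems | ibm/q3/q3.py | findMinimumMoves
-- ===== SOURCE A (Python) =====
-- def findMinimumMoves(word: str):
--     res = 0
--     count = {}
--     for ch in word:
--         count[ch] = 1 + count.get(ch, 0)
--
--     for cnt in count.values():
--         res += (cnt // 2)
--
--     return res
-- ===== SOURCE B (Python) =====
-- def findMinimumMoves(word: str):
--     res = 0
--     seen = set()
--     for ch in word:
--         if ch in seen:
--             seen.discard(ch)
--             res += 1
--         else:
--             seen.add(ch)
--     return res
-- ===== Notes on version B (the rewrite author's own statement) =====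
-- stated objective: alternative
-- what changed: Replaces the two-phase count-dict-then-sum-halves structure with a single incremental pass that keeps a set of currently unpaired characters and counts a pair each time a character recurs.
import Mathlib
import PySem

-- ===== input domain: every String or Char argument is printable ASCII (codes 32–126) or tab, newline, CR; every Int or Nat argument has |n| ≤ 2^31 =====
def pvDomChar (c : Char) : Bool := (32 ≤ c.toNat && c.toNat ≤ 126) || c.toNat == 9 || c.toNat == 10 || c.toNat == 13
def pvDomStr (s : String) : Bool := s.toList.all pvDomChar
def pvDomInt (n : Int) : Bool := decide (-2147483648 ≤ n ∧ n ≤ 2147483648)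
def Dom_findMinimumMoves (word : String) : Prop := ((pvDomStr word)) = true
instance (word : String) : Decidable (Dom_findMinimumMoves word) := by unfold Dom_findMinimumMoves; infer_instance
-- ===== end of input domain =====

-- B replaces A's count-then-sum-halves two-phase loop by a single pass keeping a set of
-- currently unpaired characters, counting a pair whenever a character recurs (objective: alternative).

-- ===== PORT A =====
def findMinimumMoves (word : String) : Int :=
  let count := word.toList.foldl (fun d ch => d.insert ch (1 + d.getD ch 0))
    (PySem.Dict.empty : PySem.Dict Char Int)
  count.values.foldl (fun res cnt => res + PySem.Int.floordiv cnt 2) 0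

-- ===== PORT B =====
-- loop body of B: complete a pair if ch is unpaired, else mark it unpaired
def bstep (st : PySem.Set Char × Int) (ch : Char) : PySem.Set Char × Int :=
  if PySem.Set.contains st.1 ch then (PySem.Set.discard st.1 ch, st.2 + 1)
  else (PySem.Set.add st.1 ch, st.2)

def findMinimumMoves_alt (word : String) : Int :=
  (word.toList.foldl bstep ((PySem.Set.empty : PySem.Set Char), 0)).2

-- ===== PRECONDITION & SPEC =====
def Spec_findMinimumMoves (word : String) (out : Int) : Prop := out = findMinimumMoves_alt word
instance (word : String) (out : Int) : Decidable (Spec_findMinimumMoves word out) := by unfold Spec_findMinimumMoves; infer_instance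

-- ===== CLAIM (what is proved, stated in full; the proofs are below) =====
def Claim_equal_findMinimumMoves : Prop := ∀ (word : String), Dom_findMinimumMoves word → Spec_findMinimumMoves word (findMinimumMoves word)

-- ===== LEMMAS AND PROOFS =====

-- invariant of B's single pass: the carried set stays duplicate-free, holds exactly the
-- characters seen an odd number of times, and twice the pair count plus the set size
-- equals the number of characters consumed.
theorem b_inv (l : List Char) : ∀ (seen : PySem.Set Char) (res : Int), seen.Nodup →
    (l.foldl bstep (seen, res)).1.Nodup
    ∧ (∀ c, c ∈ (l.foldl bstep (seen, res)).1 ↔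
        Odd (l.count c + (if c ∈ seen then 1 else 0)))
    ∧ 2 * (l.foldl bstep (seen, res)).2 + ((l.foldl bstep (seen, res)).1.length : Int)
        = 2 * res + (seen.length : Int) + (l.length : Int) := by
  induction l with
  | nil =>
    intro seen res h
    refine ⟨h, ?_, by simp⟩
    intro c
    simp [Nat.odd_iff]
    split_ifs with hc <;> simp [hc]
  | cons ch t ih =>
    intro seen res h
    simp only [List.foldl_cons]
    by_cases hin : ch ∈ seen
    · have hstep : bstep (seen, res) ch = (PySem.Set.discard seen ch, res + 1) := by
        simp [bstep, PySem.Set.contains, hin]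
      rw [hstep]
      have herase : PySem.Set.discard seen ch = seen.erase ch := by
        rw [List.Nodup.erase_eq_filter h]
        simp [PySem.Set.discard, bne]
      have hnd' : (PySem.Set.discard seen ch).Nodup := by
        rw [herase]; exact h.erase ch
      obtain ⟨h1, h2, h3⟩ := ih (PySem.Set.discard seen ch) (res + 1) hnd'
      refine ⟨h1, ?_, ?_⟩
      · intro c
        rw [h2 c]
        have hmem : c ∈ PySem.Set.discard seen ch ↔ c ∈ seen ∧ c ≠ ch := by
          simp [PySem.Set.discard, List.mem_filter]
        by_cases hc : c = ch
        · subst hc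
          simp only [hmem, hin, ne_eq, not_true_eq_false, and_false, if_false,
            List.count_cons_self, if_true, Nat.odd_iff]
          omega
        · have hz : (if ch = c then 1 else 0) = 0 := if_neg (fun e => hc e.symm)
          simp [hmem, hc, List.count_cons, hz]
      · rw [h3]
        have hlen : (PySem.Set.discard seen ch).length = seen.length - 1 := by
          rw [herase]; exact List.length_erase_of_mem hin
        have hpos : 1 ≤ seen.length := List.length_pos_of_mem hin
        rw [hlen]
        simp only [List.length_cons]
        push_cast [Nat.cast_sub hpos]
        ring
    · have hstep : bstep (seen, res) ch = (PySem.Set.add seen ch, res) := by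
        simp [bstep, PySem.Set.contains, hin]
      rw [hstep]
      have hadd : PySem.Set.add seen ch = seen ++ [ch] := by
        simp [PySem.Set.add, PySem.Set.contains, hin]
      have hnd' : (PySem.Set.add seen ch).Nodup := by
        rw [hadd]
        exact h.append (List.nodup_singleton ch)
          (by intro a ha hb; rw [List.mem_singleton] at hb; exact hin (hb ▸ ha))
      obtain ⟨h1, h2, h3⟩ := ih (PySem.Set.add seen ch) res hnd'
      refine ⟨h1, ?_, ?_⟩
      · intro c
        rw [h2 c]
        have hmem : c ∈ PySem.Set.add seen ch ↔ c ∈ seen ∨ c = ch := by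
          rw [hadd]; simp
        by_cases hc : c = ch
        · subst hc
          simp [hin, List.count_cons_self]
        · have hz : (if ch = c then 1 else 0) = 0 := if_neg (fun e => hc e.symm)
          simp [hmem, hc, List.count_cons, hz]
      · rw [h3, hadd]
        simp only [List.length_append, List.length_cons, List.length_nil]
        push_cast
        ring

-- A's fold builds collections.Counter(word) and then sums count // 2 over the values.
theorem a_eq (word : String) : findMinimumMoves word =
    ∑ c ∈ word.toList.toFinset, ((word.toList.count c / 2 : Nat) : Int) := by
  unfold findMinimumMoves
  have hfun : (fun (d : PySem.Dict Char Int) ch => d.insert ch (1 + d.getD ch 0))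
      = (fun (d : PySem.Dict Char Int) ch => d.insert ch (d.getD ch 0 + 1)) := by
    funext d ch; rw [Int.add_comm]
  rw [hfun, PySem.Dict.foldl_insert_getD_add_one_eq_counter, PySem.List.foldl_add]
  simp only [PySem.Dict.values, PySem.Dict.items_counter, List.map_map, zero_add]
  rw [← List.sum_toFinset _ (PySem.Set.nodup_ofList word.toList)]
  have hts : (PySem.Set.ofList word.toList).toFinset = word.toList.toFinset := by
    ext c; simp [PySem.Set.mem_ofList]
  rw [hts]
  apply Finset.sum_congr rfl
  intro c _
  simp only [Function.comp_apply]
  rw [PySem.Int.floordiv_eq_ediv_of_pos (by norm_num)]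
  omega

-- the pairing identity: twice the sum of half-counts plus the number of odd-count
-- characters equals the total length.
theorem pair_identity (l : List Char) :
    2 * (∑ c ∈ l.toFinset, l.count c / 2)
      + (l.toFinset.filter (fun c => Odd (l.count c))).card = l.length := by
  have h1 : ∑ c ∈ l.toFinset, l.count c
      = 2 * (∑ c ∈ l.toFinset, l.count c / 2)
        + (l.toFinset.filter (fun c => Odd (l.count c))).card := by
    rw [Finset.mul_sum, Finset.card_filter, ← Finset.sum_add_distrib]
    apply Finset.sum_congr rfl
    intro c _
    by_cases hx : Odd (l.count c)
    · rw [if_pos hx]; rw [Nat.odd_iff] at hx; omega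
    · rw [if_neg hx]; rw [Nat.odd_iff] at hx; omega
  have h2 := List.sum_toFinset_count_eq_length l
  omega

-- ===== VERDICT (by name: the statement is the Claim_ definition above) =====
theorem findMinimumMoves_spec : Claim_equal_findMinimumMoves := by
  unfold Claim_equal_findMinimumMoves Spec_findMinimumMoves
  intro word _
  set l := word.toList with hl
  obtain ⟨hnd, hmem, hlen⟩ := b_inv l [] 0 List.nodup_nil
  have hS : (l.foldl bstep ([], 0)).1.length
      = (l.toFinset.filter (fun c => Odd (l.count c))).card := by
    rw [← List.toFinset_card_of_nodup hnd]
    congr 1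
    ext c
    simp only [List.mem_toFinset, Finset.mem_filter]
    have hm := hmem c
    simp only [List.not_mem_nil, if_false, Nat.add_zero] at hm
    rw [hm]
    constructor
    · intro hodd
      exact ⟨List.count_pos_iff.mp (by rcases hodd with ⟨k, hk⟩; omega), hodd⟩
    · exact fun h => h.2
  have hP := pair_identity l
  rw [a_eq word]
  show (∑ c ∈ l.toFinset, ((l.count c / 2 : Nat) : Int)) = (l.foldl bstep ([], 0)).2
  have hcast : (∑ c ∈ l.toFinset, ((l.count c / 2 : Nat) : Int))
      = ((∑ c ∈ l.toFinset, l.count c / 2 : Nat) : Int) := by push_cast; rfl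
  rw [hcast]
  simp only [List.length_nil, Nat.cast_zero, add_zero] at hlen
  rw [hS] at hlen
  omega
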